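-- pv_equiv track=rewrite | github.com/jorzel/codefights | bots/taskTypes.py | tasksTypes
-- ===== SOURCE A (Python) =====
-- def tasksTypes(deadlines, day):
--     result = [0, 0, 0]
--     for d in deadlines:
--         if day >= d:
--             result[0] += 1
--         elif (d - day) <= 7:
--             result[1] += 1
--         else:
--             result[2] += 1
--     return result
-- ===== SOURCE B (Python) =====
-- def tasksTypes(deadlines, day):
--     # cumulative cut counts instead of a per-element three-way branch
--     overdue = sum(1 for d in deadlines if d <= day)
--     within_week = sum(1 for d in deadlines if d <= day + 7)
--     return [overdue, within_week - overdue, len(deadlines) - within_week]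
-- ===== Notes on version B (the rewrite author's own statement) =====
-- stated objective: simpler
-- what changed: Replaces the one-pass if/elif three-counter loop with two cumulative threshold counts (deadlines <= day and <= day+7) whose differences give the three buckets arithmetically.
import Mathlib
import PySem

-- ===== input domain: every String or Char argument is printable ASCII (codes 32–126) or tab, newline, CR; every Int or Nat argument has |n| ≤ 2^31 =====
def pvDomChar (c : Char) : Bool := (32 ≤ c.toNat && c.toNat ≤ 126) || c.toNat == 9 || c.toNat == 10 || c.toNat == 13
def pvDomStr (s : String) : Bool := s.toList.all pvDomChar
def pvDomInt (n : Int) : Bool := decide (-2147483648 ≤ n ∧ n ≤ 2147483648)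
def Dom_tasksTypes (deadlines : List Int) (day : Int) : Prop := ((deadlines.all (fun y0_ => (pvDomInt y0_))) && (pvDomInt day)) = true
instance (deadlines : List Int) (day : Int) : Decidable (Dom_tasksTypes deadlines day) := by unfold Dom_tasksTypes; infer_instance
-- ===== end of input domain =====

-- B replaces A's one-pass if/elif three-counter loop with two cumulative threshold counts and arithmetic differences (simpler decomposition, same O(n) cost).


-- ===== PORT A =====
-- result = [0,0,0]; for d in deadlines: if day >= d: result[0]+=1 elif (d-day) <= 7: result[1]+=1 else: result[2]+=1
def tasksTypes (deadlines : List Int) (day : Int) : List Int :=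
  deadlines.foldl
    (fun result d =>
      if day ≥ d then result.set 0 (result.getD 0 0 + 1)
      else if d - day ≤ 7 then result.set 1 (result.getD 1 0 + 1)
      else result.set 2 (result.getD 2 0 + 1))
    [0, 0, 0]

-- ===== PORT B =====
-- overdue = sum(1 for d if d <= day); within_week = sum(1 for d if d <= day+7); arithmetic differences
def tasksTypes_alt (deadlines : List Int) (day : Int) : List Int :=
  let overdue : Int := (deadlines.countP (fun d => d ≤ day) : Int)
  let withinWeek : Int := (deadlines.countP (fun d => d ≤ day + 7) : Int)
  [overdue, withinWeek - overdue, (deadlines.length : Int) - withinWeek]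

-- ===== PRECONDITION & SPEC =====
def Spec_tasksTypes (deadlines : List Int) (day : Int) (out : List Int) : Prop := out = tasksTypes_alt deadlines day
instance (deadlines : List Int) (day : Int) (out : List Int) : Decidable (Spec_tasksTypes deadlines day out) := by unfold Spec_tasksTypes; infer_instance

-- ===== CLAIM (what is proved, stated in full; the proofs are below) =====
def Claim_equal_tasksTypes : Prop := ∀ (deadlines : List Int) (day : Int), Dom_tasksTypes deadlines day → Spec_tasksTypes deadlines day (tasksTypes deadlines day)

-- ===== LEMMAS AND PROOFS =====

-- the fold keeps a triple of running counters; each step adds 1 to exactly the bucket of d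
lemma tasksTypes_fold (day : Int) (l : List Int) : ∀ (a b c : Int),
    l.foldl
      (fun result d =>
        if day ≥ d then result.set 0 (result.getD 0 0 + 1)
        else if d - day ≤ 7 then result.set 1 (result.getD 1 0 + 1)
        else result.set 2 (result.getD 2 0 + 1))
      [a, b, c]
    = [a + (l.countP (fun d => d ≤ day) : Int),
       b + (l.countP (fun d => !(d ≤ day) && (d ≤ day + 7)) : Int),
       c + (l.countP (fun d => !(d ≤ day) && !(d ≤ day + 7)) : Int)] := by
  induction l with
  | nil => simp
  | cons x xs ih =>
    intro a b c
    simp only [List.foldl_cons]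
    by_cases h1 : day ≥ x
    · rw [if_pos h1]
      have hx : x ≤ day := h1
      simp only [List.set_cons_zero]
      rw [ih]
      simp [hx]
      omega
    · rw [if_neg h1]
      have hx : ¬ x ≤ day := h1
      by_cases h2 : x - day ≤ 7
      · rw [if_pos h2]
        have hx2 : x ≤ day + 7 := by omega
        simp only [List.set_cons_succ, List.set_cons_zero]
        rw [ih]
        simp [hx, hx2]
        omega
      · rw [if_neg h2]
        have hx2 : ¬ x ≤ day + 7 := by omega
        simp only [List.set_cons_succ, List.set_cons_zero]
        rw [ih]
        simp [hx, hx2]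
        omega

-- the two cumulative counts decompose into the disjoint buckets
lemma count_split (day : Int) (l : List Int) :
    l.countP (fun d => d ≤ day + 7)
      = l.countP (fun d => d ≤ day) + l.countP (fun d => !(d ≤ day) && (d ≤ day + 7)) ∧
    l.length
      = l.countP (fun d => d ≤ day + 7) + l.countP (fun d => !(d ≤ day) && !(d ≤ day + 7)) := by
  induction l with
  | nil => simp
  | cons x xs ih =>
    obtain ⟨ih1, ih2⟩ := ih
    by_cases h1 : x ≤ day <;> by_cases h2 : x ≤ day + 7 <;>
      simp [h1, h2, ih1, ih2] <;> omega

-- ===== VERDICT (by name: the statement is the Claim_ definition above) =====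
theorem tasksTypes_spec : Claim_equal_tasksTypes := by
  intro deadlines day _
  unfold Spec_tasksTypes tasksTypes tasksTypes_alt
  rw [tasksTypes_fold]
  obtain ⟨h1, h2⟩ := count_split day deadlines
  simp only [zero_add]
  simp only [List.cons.injEq, and_true]
  refine ⟨trivial, by omega, by omega⟩
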